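-- pv_equiv track=rewrite | github.com/KislyLemon4ik/AOIS-3-year-2-sem | lr3/laba3.py | merg2
-- ===== SOURCE A (Python) =====
-- number_of_arguments = 3
--
-- def mergebles(const1, const2, argument_index):
--     mergeability = True
--     mergeability = mergebles2(argument_index, const1, const2, mergeability)
--     return mergeability
--
-- def merg2(formula):
--     was_merged = []
--     was_used = [False for ix in range(len(formula))]
--     merge4(formula, was_merged, was_used)
--     for ix in range(len(was_used)):
--         if not(was_used[ix]):
--             was_merged.append(formula[ix])
--     return was_merged
--
-- def merge4(formula, was_merged, was_used):
--     for ix in range(number_of_arguments):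
--         for jx in range(len(formula) - 1):
--             for k in range(jx + 1, len(formula)):
--                 if mergebles(formula[jx], formula[k], ix):
--                     was_used[jx] = True
--                     was_used[k] = True
--                     was_merged.append(formula[jx].copy())
--                     was_merged[-1].pop(ix)
--                     was_merged[-1].insert(ix, -1)
--                     break
--
-- def mergebles2(argument_index, const1, const2, mergeability):
--     for ix in range(len(const1)):
--         if ix != argument_index and const1[ix] != const2[ix]:
--             mergeability = False
--             break
--         if ix == argument_index and const1[ix] == const2[ix]:
--             mergeability = False
--             break
--     return mergeability
-- ===== SOURCE B (Python) =====
-- number_of_arguments = 3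
--
-- def merg2(formula):
--     n = len(formula)
--     merged = []
--     used = [False] * n
--     for ix in range(number_of_arguments):
--         # group terms by the tuple with position ix masked out; only rows long
--         # enough to have a position ix can merge at ix
--         groups = {}
--         for j, row in enumerate(formula):
--             if ix < len(row):
--                 groups.setdefault((tuple(row[:ix]), tuple(row[ix + 1:])), []).append(j)
--         merges = [None] * n
--         for members in groups.values():
--             for p, j in enumerate(members):
--                 v = formula[j][ix]
--                 k = next((m for m in members[p + 1:] if formula[m][ix] != v), None)
--                 if k is not None:
--                     used[j] = True
--                     used[k] = True
--                     merges[j] = formula[j][:ix] + [-1] + formula[j][ix + 1:]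
--         for j in range(n):
--             if merges[j] is not None:
--                 merged.append(merges[j])
--     for j in range(n):
--         if not used[j]:
--             merged.append(formula[j])
--     return merged
-- ===== Notes on version B (the rewrite author's own statement) =====
-- stated objective: faster
-- what changed: B builds, per variable position, a dict grouping terms by their tuple with that position masked out, and looks for a merge partner only inside the term's own bucket (comparing one coordinate), instead of A's scan over all later terms with a full-row comparison each.
-- outside the precondition, e.g. on merg2([[1], [2, 3]]): A returns [[-1]], B returns [[1], [2, 3]]
import Mathlib
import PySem

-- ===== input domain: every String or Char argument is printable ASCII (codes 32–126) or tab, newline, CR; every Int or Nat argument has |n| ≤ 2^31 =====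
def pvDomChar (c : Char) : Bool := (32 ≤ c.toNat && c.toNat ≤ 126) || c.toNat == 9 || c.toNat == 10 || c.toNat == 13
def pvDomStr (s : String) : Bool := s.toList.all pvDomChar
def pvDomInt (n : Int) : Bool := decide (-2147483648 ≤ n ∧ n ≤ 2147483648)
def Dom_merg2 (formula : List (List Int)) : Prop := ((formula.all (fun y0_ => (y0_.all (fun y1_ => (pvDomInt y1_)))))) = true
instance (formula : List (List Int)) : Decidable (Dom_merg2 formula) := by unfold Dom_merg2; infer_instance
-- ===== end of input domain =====

-- B replaces A's scan over all later terms (full-row comparison each) by a per-position dict of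
-- terms grouped by the row with that position masked out, scanning only the term's own bucket.

-- ===== PORT A =====
def number_of_arguments : Int := 3

-- loop of mergebles2: 'for ix in range(len(const1)): …' with break; const2[ix] may raise
-- IndexError in Python (pyGetD default only reached outside Pre_, which forces equal row lengths)
def mergebles2Loop (argument_index : Int) (const1 const2 : List Int) (mergeability : Bool) :
    List Int → Bool
  | [] => mergeability
  | ix :: rest =>
    if ix ≠ argument_index ∧ PySem.List.pyGetD const1 ix 0 ≠ PySem.List.pyGetD const2 ix 0 then
      false
    else if ix = argument_index ∧ PySem.List.pyGetD const1 ix 0 = PySem.List.pyGetD const2 ix 0 then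
      false
    else mergebles2Loop argument_index const1 const2 mergeability rest

def mergebles2 (argument_index : Int) (const1 const2 : List Int) (mergeability : Bool) : Bool :=
  mergebles2Loop argument_index const1 const2 mergeability
    (PySem.List.pyRange 0 (const1.length : Int) 1)

def mergebles (const1 const2 : List Int) (argument_index : Int) : Bool :=
  mergebles2 argument_index const1 const2 true

-- inner 'for k in range(jx+1, len(formula)): … break' = first matching k
def merge4FindK (formula : List (List Int)) (ix jx : Int) : List Int → Option Int
  | [] => none
  | k :: rest =>
    if mergebles (PySem.List.pyGetD formula jx []) (PySem.List.pyGetD formula k []) ix then some k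
    else merge4FindK formula ix jx rest

-- body of the jx loop: mark used, append formula[jx] with position ix popped and -1 inserted
-- (pop(ix) raises IndexError in Python when ix ≥ len(row); that is outside Pre_)
def merge4Step (formula : List (List Int)) (ix : Int) (st : List (List Int) × List Bool)
    (jx : Int) : List (List Int) × List Bool :=
  match merge4FindK formula ix jx (PySem.List.pyRange (jx + 1) (formula.length : Int) 1) with
  | none => st
  | some k =>
    (st.1 ++
      [PySem.List.insert
        (((PySem.List.pop? (PySem.List.pyGetD formula jx []) ix).map (·.2)).getD
          (PySem.List.pyGetD formula jx [])) ix (-1)],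
     PySem.List.pySetD (PySem.List.pySetD st.2 jx true) k true)

def merge4 (formula : List (List Int)) (wasMerged : List (List Int)) (wasUsed : List Bool) :
    List (List Int) × List Bool :=
  (PySem.List.pyRange 0 number_of_arguments 1).foldl
    (fun st ix =>
      (PySem.List.pyRange 0 ((formula.length : Int) - 1) 1).foldl (merge4Step formula ix) st)
    (wasMerged, wasUsed)

def merg2 (formula : List (List Int)) : List (List Int) :=
  let st := merge4 formula [] (List.replicate formula.length false)
  (PySem.List.pyRange 0 (st.2.length : Int) 1).foldl
    (fun acc ix =>
      if PySem.List.pyGetD st.2 ix false = false then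
        acc ++ [PySem.List.pyGetD formula ix []]
      else acc)
    st.1

-- ===== PORT B =====
-- key of a row at position ix: the row with position ix masked out, as (row[:ix], row[ix+1:])
def altKey (row : List Int) (ix : Int) : List Int × List Int :=
  (PySem.List.slice row none (some ix), PySem.List.slice row (some (ix + 1)) none)

-- groups.setdefault(key, []).append(j) over enumerate(formula); rows without position ix skip
def altGroups (formula : List (List Int)) (ix : Int) :
    PySem.Dict (List Int × List Int) (List Int) :=
  (PySem.List.enumerate formula 0).foldl
    (fun d p =>
      if ix < (p.2.length : Int) then d.modify (altKey p.2 ix) [] (· ++ [p.1]) else d)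
    PySem.Dict.empty

-- next((m for m in members if m > j and formula[m][ix] != v), None)
def altFirstPartner (formula : List (List Int)) (ix j v : Int) : List Int → Option Int
  | [] => none
  | m :: rest =>
    if j < m ∧ PySem.List.pyGetD (PySem.List.pyGetD formula m []) ix 0 ≠ v then some m
    else altFirstPartner formula ix j v rest

-- body of B's second loop over enumerate(formula)
def altStep (formula : List (List Int)) (ix : Int)
    (groups : PySem.Dict (List Int × List Int) (List Int))
    (st : List (List Int) × List Bool) (p : Int × List Int) : List (List Int) × List Bool :=
  if ix < (p.2.length : Int) then
    match altFirstPartner formula ix p.1 (PySem.List.pyGetD p.2 ix 0)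
        (groups.getD (altKey p.2 ix) []) with
    | none => st
    | some k =>
      (st.1 ++
        [PySem.List.slice p.2 none (some ix) ++ [-1] ++ PySem.List.slice p.2 (some (ix + 1)) none],
       PySem.List.pySetD (PySem.List.pySetD st.2 p.1 true) k true)
  else st

def merg2_alt (formula : List (List Int)) : List (List Int) :=
  let st := (PySem.List.pyRange 0 3 1).foldl
    (fun st ix =>
      let groups := altGroups formula ix
      (PySem.List.enumerate formula 0).foldl (altStep formula ix groups) st)
    ([], List.replicate formula.length false)
  (PySem.List.pyRange 0 (formula.length : Int) 1).foldl
    (fun acc j =>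
      if PySem.List.pyGetD st.2 j false = false then
        acc ++ [PySem.List.pyGetD formula j []]
      else acc)
    st.1

-- ===== PRECONDITION & SPEC =====
-- Pre_ excludes (a) formulas whose rows have unequal lengths: A compares only a prefix there and
-- either raises IndexError or merges accidentally; (b) formulas with rows shorter than 3 that
-- contain duplicate rows: A raises IndexError popping a position past the row's end.
def Pre_merg2 (formula : List (List Int)) : Prop :=
  (∀ r ∈ formula, ∀ s ∈ formula, r.length = s.length) ∧
  ((∃ r ∈ formula, r.length < 3) → formula.Nodup)

instance (formula : List (List Int)) : Decidable (Pre_merg2 formula) := by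
  unfold Pre_merg2; infer_instance

def pvWitness_merg2 : List (List Int) := [[0, 1, 0], [0, 0, 0], [1, 1, 1]]

def Spec_merg2 (formula : List (List Int)) (out : List (List Int)) : Prop := out = merg2_alt formula
instance (formula : List (List Int)) (out : List (List Int)) : Decidable (Spec_merg2 formula out) := by unfold Spec_merg2; infer_instance

-- ===== CLAIM (what is proved, stated in full; the proofs are below) =====
def Claim_equal_merg2 : Prop := ∀ (formula : List (List Int)), Dom_merg2 formula → Pre_merg2 formula → Spec_merg2 formula (merg2 formula)

-- ===== LEMMAS AND PROOFS =====

-- formula[j] as the ports read it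
def fr (formula : List (List Int)) (j : Int) : List Int := PySem.List.pyGetD formula j []

-- first merge partner of j at position ix, as A computes it
def kSpec (formula : List (List Int)) (ix j : Int) : Option Int :=
  merge4FindK formula ix j (PySem.List.pyRange (j + 1) (formula.length : Int) 1)

-- the common shape of one jx-step of either program
def canonStep (formula : List (List Int)) (ix : Int) (st : List (List Int) × List Bool)
    (j : Int) : List (List Int) × List Bool :=
  match kSpec formula ix j with
  | none => st
  | some k =>
    (st.1 ++ [(fr formula j).take ix.toNat ++ -1 :: (fr formula j).drop (ix.toNat + 1)],
     PySem.List.pySetD (PySem.List.pySetD st.2 j true) k true)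

theorem fr_mem (formula : List (List Int)) (j : Int) (h0 : 0 ≤ j)
    (hlt : j < (formula.length : Int)) : fr formula j ∈ formula := by
  apply PySem.List.pyGetD_mem
  exact ⟨by omega, hlt⟩

theorem mergebles2Loop_true_iff (a : Int) (c1 c2 : List Int) (ixs : List Int) :
    mergebles2Loop a c1 c2 true ixs = true ↔
      ∀ pos ∈ ixs,
        (pos ≠ a → PySem.List.pyGetD c1 pos 0 = PySem.List.pyGetD c2 pos 0) ∧
        (pos = a → PySem.List.pyGetD c1 pos 0 ≠ PySem.List.pyGetD c2 pos 0) := by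
  induction ixs with
  | nil => simp [mergebles2Loop]
  | cons ix rest ih =>
    unfold mergebles2Loop
    split_ifs with h1 h2
    · simp only [false_iff]
      intro h
      exact h1.2 (((h ix (List.mem_cons_self)).1) h1.1)
    · simp only [false_iff]
      intro h
      exact ((h ix (List.mem_cons_self)).2 h2.1) h2.2
    · rw [ih]
      constructor
      · intro h pos hpos
        rcases List.mem_cons.1 hpos with rfl | hm
        · constructor
          · intro hne
            by_contra hne2
            exact h1 ⟨hne, hne2⟩
          · intro heq
            by_contra heq2
            exact h2 ⟨heq, heq2⟩
        · exact h pos hm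
      · intro h pos hpos
        exact h pos (List.mem_cons_of_mem _ hpos)

theorem mergebles_true_iff (r s : List Int) (ix : Int) :
    mergebles r s ix = true ↔
      ∀ pos : Int, 0 ≤ pos → pos < (r.length : Int) →
        (pos ≠ ix → PySem.List.pyGetD r pos 0 = PySem.List.pyGetD s pos 0) ∧
        (pos = ix → PySem.List.pyGetD r pos 0 ≠ PySem.List.pyGetD s pos 0) := by
  unfold mergebles mergebles2
  rw [mergebles2Loop_true_iff]
  constructor
  · intro h pos h0 hlt
    exact h pos (PySem.List.mem_pyRange_one.2 ⟨h0, hlt⟩)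
  · intro h pos hpos
    rcases PySem.List.mem_pyRange_one.1 hpos with ⟨h0, hlt⟩
    exact h pos h0 hlt

theorem mergebles_char_lt (r s : List Int) (ix : Int) (h0 : 0 ≤ ix)
    (hlt : ix < (r.length : Int)) (hlen : r.length = s.length) :
    mergebles r s ix = true ↔
      (r.take ix.toNat = s.take ix.toNat ∧ r.drop (ix.toNat + 1) = s.drop (ix.toNat + 1) ∧
        PySem.List.pyGetD r ix 0 ≠ PySem.List.pyGetD s ix 0) := by
  rw [mergebles_true_iff]
  constructor
  · intro h
    refine ⟨?_, ?_, (h ix h0 hlt).2 rfl⟩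
    · apply List.ext_getElem
      · simp [hlen]
      · intro i hi1 hi2
        simp only [List.getElem_take]
        have hir : (i : Int) < (r.length : Int) := by
          simp only [List.length_take] at hi1; omega
        have hne : (i : Int) ≠ ix := by
          simp only [List.length_take] at hi1
          have : i < ix.toNat := by omega
          omega
        have := (h i (Int.natCast_nonneg i) hir).1 hne
        rw [PySem.List.pyGetD_eq_getElem r 0 (Int.natCast_nonneg i) hir,
            PySem.List.pyGetD_eq_getElem s 0 (Int.natCast_nonneg i) (by omega)] at this
        simpa using this
    · apply List.ext_getElem
      · simp [hlen]
      · intro i hi1 hi2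
        simp only [List.getElem_drop]
        have hir : ((ix.toNat + 1 + i : Nat) : Int) < (r.length : Int) := by
          simp only [List.length_drop] at hi1; omega
        have hne : ((ix.toNat + 1 + i : Nat) : Int) ≠ ix := by omega
        have := (h _ (Int.natCast_nonneg _) hir).1 hne
        rw [PySem.List.pyGetD_eq_getElem r 0 (Int.natCast_nonneg _) hir,
            PySem.List.pyGetD_eq_getElem s 0 (Int.natCast_nonneg _) (by omega)] at this
        simpa only [Int.toNat_natCast] using this
  · rintro ⟨htake, hdrop, hdiff⟩ pos hp0 hplt
    constructor
    · intro hne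
      rw [PySem.List.pyGetD_eq_getElem r 0 hp0 hplt,
          PySem.List.pyGetD_eq_getElem s 0 hp0 (by omega)]
      by_cases hcmp : pos.toNat < ix.toNat
      · have h1 : pos.toNat < (r.take ix.toNat).length := by
          simp only [List.length_take]; omega
        have := congrArg (fun l => l[pos.toNat]?) htake
        simp only [List.getElem?_take] at this
        have h2 : pos.toNat < r.length := by omega
        have h3 : pos.toNat < s.length := by omega
        simp only [if_pos hcmp, List.getElem?_eq_getElem h2, List.getElem?_eq_getElem h3] at this
        exact Option.some.inj this
      · have hgt : ix.toNat + 1 ≤ pos.toNat := by omega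
        have := congrArg (fun l => l[pos.toNat - (ix.toNat + 1)]?) hdrop
        simp only [List.getElem?_drop] at this
        have harg : ix.toNat + 1 + (pos.toNat - (ix.toNat + 1)) = pos.toNat := by omega
        rw [harg] at this
        have h2 : pos.toNat < r.length := by omega
        have h3 : pos.toNat < s.length := by omega
        simp only [List.getElem?_eq_getElem h2, List.getElem?_eq_getElem h3] at this
        exact Option.some.inj this
    · intro heq
      subst heq
      exact hdiff

theorem mergebles_char_ge (r s : List Int) (ix : Int) (hge : (r.length : Int) ≤ ix)
    (hlen : r.length = s.length) : (mergebles r s ix = true) ↔ r = s := by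
  rw [mergebles_true_iff]
  constructor
  · intro h
    apply List.ext_getElem hlen
    intro i hi1 hi2
    have hir : (i : Int) < (r.length : Int) := by omega
    have hne : (i : Int) ≠ ix := by omega
    have := (h i (Int.natCast_nonneg i) hir).1 hne
    rw [PySem.List.pyGetD_eq_getElem r 0 (Int.natCast_nonneg i) hir,
        PySem.List.pyGetD_eq_getElem s 0 (Int.natCast_nonneg i) (by omega)] at this
    simpa using this
  · rintro rfl pos hp0 hplt
    refine ⟨fun _ => rfl, fun hpos => ?_⟩
    exfalso
    omega

theorem merge4FindK_eq_find? (formula : List (List Int)) (ix jx : Int) (ks : List Int) :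
    merge4FindK formula ix jx ks =
      ks.find? (fun k =>
        mergebles (PySem.List.pyGetD formula jx []) (PySem.List.pyGetD formula k []) ix) := by
  induction ks with
  | nil => rfl
  | cons k rest ih =>
    unfold merge4FindK
    rw [List.find?_cons]
    split_ifs with h
    · simp [h]
    · simp only [Bool.not_eq_true] at h
      simp [h, ih]

theorem altFirstPartner_eq_find? (formula : List (List Int)) (ix j v : Int) (ms : List Int) :
    altFirstPartner formula ix j v ms =
      ms.find? (fun m =>
        decide (j < m ∧ PySem.List.pyGetD (PySem.List.pyGetD formula m []) ix 0 ≠ v)) := by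
  induction ms with
  | nil => rfl
  | cons m rest ih =>
    unfold altFirstPartner
    rw [List.find?_cons]
    by_cases h : j < m ∧ PySem.List.pyGetD (PySem.List.pyGetD formula m []) ix 0 ≠ v
    · simp [h]
    · simp [h, ih]

theorem find?_filter_eq {α : Type} (l : List α) (q p : α → Bool) :
    (l.filter q).find? p = l.find? (fun a => q a && p a) := by
  induction l with
  | nil => rfl
  | cons x rest ih =>
    by_cases hq : q x
    · rw [List.filter_cons_of_pos hq, List.find?_cons, List.find?_cons]
      by_cases hp : p x
      · simp [hq, hp]
      · simp only [Bool.not_eq_true] at hp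
        simp [hq, hp, ih]
    · simp only [Bool.not_eq_true] at hq
      rw [List.filter_cons_of_neg (by simp [hq]), List.find?_cons]
      simp [hq, ih]

theorem find?_congr_mem {α : Type} (l : List α) (p q : α → Bool)
    (h : ∀ x ∈ l, p x = q x) : l.find? p = l.find? q := by
  induction l with
  | nil => rfl
  | cons x rest ih =>
    rw [List.find?_cons, List.find?_cons, h x List.mem_cons_self,
        ih (fun y hy => h y (List.mem_cons_of_mem _ hy))]

theorem altKey_eq (row : List Int) (ix : Int) (h0 : 0 ≤ ix) :
    altKey row ix = (row.take ix.toNat, row.drop (ix.toNat + 1)) := by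
  unfold altKey
  rw [PySem.List.slice_to row h0, PySem.List.slice_from row (by omega : (0:Int) ≤ ix + 1)]
  have : (ix + 1).toNat = ix.toNat + 1 := by omega
  rw [this]

theorem foldl_const {α β : Type} (l : List α) (f : β → α → β) (st : β)
    (h : ∀ st x, x ∈ l → f st x = st) : l.foldl f st = st := by
  induction l generalizing st with
  | nil => rfl
  | cons x rest ih =>
    rw [List.foldl_cons, h st x List.mem_cons_self]
    exact ih st (fun st' y hy => h st' y (List.mem_cons_of_mem _ hy))

theorem altGroups_getD (formula : List (List Int)) (ix : Int)
    (hix : ∀ r ∈ formula, ix < (r.length : Int)) (key : List Int × List Int) :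
    (altGroups formula ix).getD key [] =
      (PySem.List.pyRange 0 (formula.length : Int) 1).filter
        (fun m => altKey (fr formula m) ix == key) := by
  unfold altGroups
  rw [PySem.List.enumerate_eq_map_pyRange formula [], List.foldl_map]
  simp only [PySem.List.len_eq]
  rw [PySem.List.foldl_congr_mem _ _
      (fun (d : PySem.Dict (List Int × List Int) (List Int)) (j : Int) =>
        d.modify (altKey (fr formula j) ix) [] (· ++ [j])) _
      (by
        intro d j hj
        rcases PySem.List.mem_pyRange_one.1 hj with ⟨h1, h2⟩
        simp only
        have hc : ix < ((PySem.List.pyGetD formula j []).length : Int) :=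
          hix _ (fr_mem formula j h1 h2)
        rw [if_pos hc]
        rfl)]
  rw [← List.foldl_map (f := fun j : Int => (altKey (fr formula j) ix, j))
      (g := fun (d : PySem.Dict (List Int × List Int) (List Int)) p =>
        d.modify p.1 [] (· ++ [p.2]))]
  rw [PySem.Dict.getD_foldl_modify_append, PySem.Dict.getD_empty, List.nil_append]
  rw [List.filter_map, List.map_map]
  simp [Function.comp_def]

theorem kSpec_eq_alt (formula : List (List Int)) (ix j : Int)
    (hlen : ∀ r ∈ formula, ∀ s ∈ formula, r.length = s.length)
    (hix : ∀ r ∈ formula, ix < (r.length : Int)) (h0 : 0 ≤ ix)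
    (hj : 0 ≤ j) (hjn : j < (formula.length : Int)) :
    altFirstPartner formula ix j (PySem.List.pyGetD (fr formula j) ix 0)
      ((PySem.List.pyRange 0 (formula.length : Int) 1).filter
        (fun m => altKey (fr formula m) ix == altKey (fr formula j) ix)) =
    kSpec formula ix j := by
  unfold fr
  rw [altFirstPartner_eq_find?, find?_filter_eq]
  unfold kSpec
  rw [merge4FindK_eq_find?,
      PySem.List.pyRange_one_append 0 (j + 1) (formula.length : Int) (by omega) (by omega),
      List.find?_append]
  have hnone : (PySem.List.pyRange 0 (j + 1)).find?
      (fun m => (altKey (PySem.List.pyGetD formula m []) ix ==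
          altKey (PySem.List.pyGetD formula j []) ix) &&
        decide (j < m ∧ PySem.List.pyGetD (PySem.List.pyGetD formula m []) ix 0 ≠
          PySem.List.pyGetD (PySem.List.pyGetD formula j []) ix 0)) = none := by
    apply List.find?_eq_none.2
    intro m hm
    rcases PySem.List.mem_pyRange_one.1 hm with ⟨_, hm2⟩
    simp only [Bool.and_eq_true, decide_eq_true_eq, not_and]
    intro _ hjm
    exact absurd hjm (by omega)
  rw [hnone, Option.none_or]
  apply find?_congr_mem
  intro m hm
  rcases PySem.List.mem_pyRange_one.1 hm with ⟨hm1, hm2⟩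
  have hmj := fr_mem formula j hj hjn
  have hmm := fr_mem formula m (by omega) hm2
  apply Bool.eq_iff_iff.mpr
  simp only [Bool.and_eq_true, beq_iff_eq, decide_eq_true_eq, altKey_eq _ _ h0, Prod.mk.injEq,
    mergebles_char_lt (PySem.List.pyGetD formula j []) (PySem.List.pyGetD formula m []) ix h0
      (hix _ hmj) (hlen _ hmj _ hmm)]
  constructor
  · rintro ⟨⟨ht, hd⟩, _, hv⟩
    exact ⟨ht.symm, hd.symm, fun h => hv h.symm⟩
  · rintro ⟨ht, hd, hv⟩
    exact ⟨⟨ht.symm, hd.symm⟩, by omega, fun h => hv h.symm⟩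

theorem mask_eq_nat (row : List Int) (ixn : Nat) (hn : ixn < row.length) :
    PySem.List.insert (((PySem.List.pop? row (ixn : Int)).map (·.2)).getD row) (ixn : Int) (-1) =
      row.take ixn ++ -1 :: row.drop (ixn + 1) := by
  rw [PySem.List.pop?_natCast row ixn hn]
  simp only [Option.map_some, Option.getD_some]
  rw [List.eraseIdx_eq_take_drop_succ,
      PySem.List.insert_natCast _ ixn (-1)
        (by simp only [List.length_append, List.length_take, List.length_drop]; omega)]
  rw [List.take_append_of_le_length (by simp only [List.length_take]; omega), List.take_take]
  rw [List.drop_append_of_le_length (by simp only [List.length_take]; omega)]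
  rw [min_self, List.drop_eq_nil_of_le (by simp only [List.length_take]; omega), List.nil_append]

theorem mask_eq (row : List Int) (ix : Int) (h0 : 0 ≤ ix) (hlt : ix < (row.length : Int)) :
    PySem.List.insert (((PySem.List.pop? row ix).map (·.2)).getD row) ix (-1) =
      row.take ix.toNat ++ -1 :: row.drop (ix.toNat + 1) := by
  have hx : ix = ((ix.toNat : Nat) : Int) := by omega
  rw [hx]
  exact mask_eq_nat row ix.toNat (by omega)

theorem kSpec_none_of_ge (formula : List (List Int)) (ix j : Int)
    (hlen : ∀ r ∈ formula, ∀ s ∈ formula, r.length = s.length)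
    (hge : ∀ r ∈ formula, (r.length : Int) ≤ ix) (hnd : formula.Nodup) (hj : 0 ≤ j) :
    kSpec formula ix j = none := by
  unfold kSpec
  rw [merge4FindK_eq_find?]
  apply List.find?_eq_none.2
  intro k hk
  rcases PySem.List.mem_pyRange_one.1 hk with ⟨hk1, hk2⟩
  have hjn : j < (formula.length : Int) := by omega
  have hmj := fr_mem formula j hj hjn
  have hmk := fr_mem formula k (by omega) hk2
  rw [Bool.not_eq_true,
      ← Bool.not_eq_true (mergebles (PySem.List.pyGetD formula j []) (PySem.List.pyGetD formula k []) ix)]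
  intro htrue
  have heq := (mergebles_char_ge _ _ ix (hge _ hmj) (hlen _ hmj _ hmk)).1 htrue
  have hjg : fr formula j = formula[j.toNat]'(by omega) :=
    PySem.List.pyGetD_eq_getElem formula [] hj hjn
  have hkg : fr formula k = formula[k.toNat]'(by omega) :=
    PySem.List.pyGetD_eq_getElem formula [] (by omega) hk2
  have : formula[j.toNat]'(by omega) = formula[k.toNat]'(by omega) := by
    rw [← hjg, ← hkg]; exact heq
  have := (hnd.getElem_inj_iff).1 this
  omega

theorem merge4Step_eq_canon_lt (formula : List (List Int)) (ix : Int)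
    (hix : ∀ r ∈ formula, ix < (r.length : Int)) (h0 : 0 ≤ ix)
    (st : List (List Int) × List Bool) (j : Int) (hj : 0 ≤ j) :
    merge4Step formula ix st j = canonStep formula ix st j := by
  unfold merge4Step canonStep
  have hk : merge4FindK formula ix j
      (PySem.List.pyRange (j + 1) (formula.length : Int) 1) = kSpec formula ix j := rfl
  rw [hk]
  cases h : kSpec formula ix j with
  | none => rfl
  | some k =>
    have hmemk : k ∈ PySem.List.pyRange (j + 1) (formula.length : Int) 1 := by
      have h' := h
      unfold kSpec at h'
      rw [merge4FindK_eq_find?] at h'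
      exact List.mem_of_find?_eq_some h'
    rcases PySem.List.mem_pyRange_one.1 hmemk with ⟨hk1, hk2⟩
    have hjn : j < (formula.length : Int) := by omega
    have hlt : ix < ((fr formula j).length : Int) := hix _ (fr_mem formula j hj hjn)
    rw [mask_eq (PySem.List.pyGetD formula j []) ix h0 hlt]
    rfl

theorem altStep_eq_canon_lt (formula : List (List Int)) (ix : Int)
    (hlen : ∀ r ∈ formula, ∀ s ∈ formula, r.length = s.length)
    (hix : ∀ r ∈ formula, ix < (r.length : Int)) (h0 : 0 ≤ ix)
    (st : List (List Int) × List Bool) (j : Int) (hj : 0 ≤ j)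
    (hjn : j < (formula.length : Int)) :
    altStep formula ix (altGroups formula ix) st (j, fr formula j) = canonStep formula ix st j := by
  unfold altStep
  simp only
  have hc : ix < ((fr formula j).length : Int) := hix _ (fr_mem formula j hj hjn)
  rw [if_pos hc]
  rw [altGroups_getD formula ix hix (altKey (fr formula j) ix)]
  rw [kSpec_eq_alt formula ix j hlen hix h0 hj hjn]
  unfold canonStep
  cases h : kSpec formula ix j with
  | none => rfl
  | some k =>
    simp only
    rw [PySem.List.slice_to _ h0, PySem.List.slice_from _ (by omega : (0:Int) ≤ ix + 1)]
    rw [show (ix + 1).toNat = ix.toNat + 1 from by omega]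
    simp [List.append_assoc]

theorem stage_eq (formula : List (List Int)) (ix : Int) (hPre : Pre_merg2 formula)
    (h0 : 0 ≤ ix) (h3 : ix < 3) (st : List (List Int) × List Bool) :
    (PySem.List.pyRange 0 ((formula.length : Int) - 1) 1).foldl (merge4Step formula ix) st =
      (PySem.List.enumerate formula 0).foldl (altStep formula ix (altGroups formula ix)) st := by
  by_cases hC : ∀ r ∈ formula, ix < (r.length : Int)
  · -- every row has a position ix: both sides are the canonical fold
    rw [PySem.List.enumerate_eq_map_pyRange formula [], List.foldl_map]
    simp only [PySem.List.len_eq]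
    rw [PySem.List.foldl_congr_mem (PySem.List.pyRange 0 (formula.length : Int)) _
        (canonStep formula ix) st
        (by
          intro st' j hj
          rcases PySem.List.mem_pyRange_one.1 hj with ⟨h1, h2⟩
          exact altStep_eq_canon_lt formula ix hPre.1 hC h0 st' j h1 h2)]
    rw [PySem.List.foldl_congr_mem (PySem.List.pyRange 0 ((formula.length : Int) - 1)) _
        (canonStep formula ix) st
        (by
          intro st' j hj
          rcases PySem.List.mem_pyRange_one.1 hj with ⟨h1, h2⟩
          exact merge4Step_eq_canon_lt formula ix hC h0 st' j h1)]
    by_cases hn : (formula.length : Int) ≤ 0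
    · rw [PySem.List.pyRange_one_eq_nil (by omega), PySem.List.pyRange_one_eq_nil (by omega)]
    · have hsing : PySem.List.pyRange ((formula.length : Int) - 1) (formula.length : Int) =
          [(formula.length : Int) - 1] := by
        have h := PySem.List.pyRange_one_singleton ((formula.length : Int) - 1)
        rwa [show (formula.length : Int) - 1 + 1 = (formula.length : Int) from by omega] at h
      rw [PySem.List.pyRange_one_append 0 ((formula.length : Int) - 1) (formula.length : Int)
          (by omega) (by omega), hsing, List.foldl_append, List.foldl_cons, List.foldl_nil]
      have hnone : kSpec formula ix ((formula.length : Int) - 1) = none := by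
        unfold kSpec
        rw [show (formula.length : Int) - 1 + 1 = (formula.length : Int) from by omega,
            PySem.List.pyRange_one_eq_nil le_rfl]
        rfl
      unfold canonStep
      rw [hnone]
  · -- no row has a position ix: both loops change nothing
    have hge : ∀ r ∈ formula, (r.length : Int) ≤ ix := by
      push Not at hC
      rcases hC with ⟨r0, hr0, hr0le⟩
      intro r hr
      have := hPre.1 r hr r0 hr0
      omega
    have hnd : formula.Nodup := by
      apply hPre.2
      push Not at hC
      rcases hC with ⟨r0, hr0, hr0le⟩
      exact ⟨r0, hr0, by omega⟩
    rw [foldl_const _ _ st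
        (by
          intro st' j hj
          rcases PySem.List.mem_pyRange_one.1 hj with ⟨h1, _⟩
          unfold merge4Step
          have hk : merge4FindK formula ix j
              (PySem.List.pyRange (j + 1) (formula.length : Int) 1) = kSpec formula ix j := rfl
          rw [hk, kSpec_none_of_ge formula ix j hPre.1 hge hnd h1])]
    rw [foldl_const _ _ st
        (by
          intro st' p hp
          have hp2 : p.2 ∈ formula := by
            have := List.mem_map_of_mem (f := fun q : Int × List Int => q.2) hp
            rwa [PySem.List.map_snd_enumerate] at this
          unfold altStep
          rw [if_neg (by have := hge _ hp2; omega)])]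

theorem altStep_len (formula : List (List Int)) (ix : Int)
    (g : PySem.Dict (List Int × List Int) (List Int)) (st : List (List Int) × List Bool)
    (p : Int × List Int) : (altStep formula ix g st p).2.length = st.2.length := by
  unfold altStep
  split_ifs with h
  · split
    · rfl
    · simp [PySem.List.length_pySetD]
  · rfl

theorem foldl_altStep_len (formula : List (List Int)) (ix : Int)
    (g : PySem.Dict (List Int × List Int) (List Int)) (l : List (Int × List Int)) :
    ∀ st : List (List Int) × List Bool,
      ((l.foldl (altStep formula ix g) st).2.length = st.2.length) := by
  induction l with
  | nil => intro st; rfl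
  | cons p rest ih =>
    intro st
    rw [List.foldl_cons, ih, altStep_len]

-- ===== VERDICT (by name: the statement is the Claim_ definition above) =====
theorem merg2_spec : Claim_equal_merg2 := by
  intro formula _ hPre
  unfold Spec_merg2
  have key : ∀ stA stB : List (List Int) × List Bool, stA = stB →
      stB.2.length = formula.length →
      ((PySem.List.pyRange 0 (stA.2.length : Int) 1).foldl
        (fun acc ix =>
          if PySem.List.pyGetD stA.2 ix false = false then
            acc ++ [PySem.List.pyGetD formula ix []]
          else acc) stA.1)
      = ((PySem.List.pyRange 0 (formula.length : Int) 1).foldl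
        (fun acc j =>
          if PySem.List.pyGetD stB.2 j false = false then
            acc ++ [PySem.List.pyGetD formula j []]
          else acc) stB.1) := by
    rintro stA stB rfl hlen
    rw [hlen]
  unfold merg2 merg2_alt merge4
  have h3 : PySem.List.pyRange 0 number_of_arguments 1 = [0, 1, 2] := by decide
  have h3' : PySem.List.pyRange 0 3 1 = [0, 1, 2] := by decide
  rw [h3, h3']
  simp only [List.foldl_cons, List.foldl_nil]
  apply key
  · rw [stage_eq formula 0 hPre (by omega) (by omega),
        stage_eq formula 1 hPre (by omega) (by omega),
        stage_eq formula 2 hPre (by omega) (by omega)]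
  · rw [foldl_altStep_len, foldl_altStep_len, foldl_altStep_len, List.length_replicate]
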